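-- pv_equiv track=rewrite | github.com/hexycat/advent-of-code | 2023/python/04/main.py | calculate_card_points
-- ===== SOURCE A (Python) =====
-- def calculate_card_points(winning_numbers: list[int], card_numbers: list[int]) -> int:
--     """Calculates winning points of the card."""
--     winning = set(winning_numbers)
--     points: int = 0
--     for number in card_numbers:
--         if number not in winning:
--             continue
--         if not points:
--             points += 1
--             continue
--         points *= 2
--     return points
-- ===== SOURCE B (Python) =====
-- def calculate_card_points(winning_numbers: list[int], card_numbers: list[int]) -> int:
--     """Calculates winning points of the card."""
--     winning = set(winning_numbers)
--     matches = sum(1 for n in card_numbers if n in winning)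
--     return 0 if matches == 0 else 2 ** (matches - 1)
-- ===== Notes on version B (the rewrite author's own statement) =====
-- stated objective: simpler
-- what changed: Replaces A's running accumulator (set to 1 on first match, doubled on each later match) with a single match count followed by the closed form 2**(matches-1).
import Mathlib
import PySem

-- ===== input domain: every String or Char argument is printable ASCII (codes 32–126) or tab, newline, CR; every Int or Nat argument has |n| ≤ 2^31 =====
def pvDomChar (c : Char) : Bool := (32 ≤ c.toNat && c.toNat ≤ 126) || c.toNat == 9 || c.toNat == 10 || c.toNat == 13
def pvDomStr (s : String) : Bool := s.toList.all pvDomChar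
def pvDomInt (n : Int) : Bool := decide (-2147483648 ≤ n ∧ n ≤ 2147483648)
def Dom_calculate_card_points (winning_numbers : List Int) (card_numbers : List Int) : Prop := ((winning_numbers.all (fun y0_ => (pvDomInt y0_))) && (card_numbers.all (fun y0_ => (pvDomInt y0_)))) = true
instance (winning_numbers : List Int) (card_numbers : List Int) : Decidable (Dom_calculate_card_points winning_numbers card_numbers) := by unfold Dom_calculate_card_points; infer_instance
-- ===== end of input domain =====

-- ===== PORT A =====
-- B replaces A's running doubling accumulator by a match count and the closed form 2^(matches-1) (objective: simpler).
def calculate_card_points (winning_numbers : List Int) (card_numbers : List Int) : Int :=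
  let winning : PySem.Set Int := PySem.Set.ofList winning_numbers
  card_numbers.foldl (fun points number =>
    if PySem.Set.contains winning number = false then points
    else if points = 0 then points + 1
    else points * 2) 0

-- ===== PORT B =====
def calculate_card_points_alt (winning_numbers : List Int) (card_numbers : List Int) : Int :=
  let winning : PySem.Set Int := PySem.Set.ofList winning_numbers
  let m_count : Nat := (card_numbers.filter (fun n => PySem.Set.contains winning n)).length
  if m_count = 0 then 0 else (2 : Int) ^ (m_count - 1)

-- ===== PRECONDITION & SPEC =====
def Spec_calculate_card_points (winning_numbers : List Int) (card_numbers : List Int) (out : Int) : Prop := out = calculate_card_points_alt winning_numbers card_numbers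
instance (winning_numbers : List Int) (card_numbers : List Int) (out : Int) : Decidable (Spec_calculate_card_points winning_numbers card_numbers out) := by unfold Spec_calculate_card_points; infer_instance

-- ===== CLAIM (what is proved, stated in full; the proofs are below) =====
def Claim_equal_calculate_card_points : Prop := ∀ (winning_numbers : List Int) (card_numbers : List Int), Dom_calculate_card_points winning_numbers card_numbers → Spec_calculate_card_points winning_numbers card_numbers (calculate_card_points winning_numbers card_numbers)

-- ===== LEMMAS AND PROOFS =====
def pvPts (m : Nat) : Int := if m = 0 then 0 else (2 : Int) ^ (m - 1)

theorem pvPts_succ_ne (k : Nat) : pvPts (k + 1) ≠ 0 := by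
  unfold pvPts
  rw [if_neg (Nat.succ_ne_zero k), Nat.add_sub_cancel]
  exact pow_ne_zero k two_ne_zero

theorem pvLoop (w : PySem.Set Int) (xs : List Int) (m : Nat) :
    xs.foldl (fun points number =>
      if PySem.Set.contains w number = false then points
      else if points = 0 then points + 1
      else points * 2) (pvPts m)
    = pvPts (m + (xs.filter (fun n => PySem.Set.contains w n)).length) := by
  induction xs generalizing m with
  | nil => simp
  | cons a xs ih =>
    by_cases h : PySem.Set.contains w a = true
    · have hstep : (if (true : Bool) = false then pvPts m
          else if pvPts m = 0 then pvPts m + 1 else pvPts m * 2) = pvPts (m + 1) := by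
        rw [if_neg (by decide : ¬ ((true : Bool) = false))]
        cases m with
        | zero => norm_num [pvPts]
        | succ k =>
          rw [if_neg (pvPts_succ_ne k)]
          unfold pvPts
          rw [if_neg (Nat.succ_ne_zero k), if_neg (Nat.succ_ne_zero (k + 1))]
          simp only [Nat.add_sub_cancel]
          rw [pow_succ]
      simp only [List.foldl_cons, List.filter_cons, h, hstep, if_true,
        List.length_cons, ih]
      congr 1
      omega
    · simp only [Bool.not_eq_true] at h
      simp only [List.foldl_cons, List.filter_cons, h, Bool.false_eq_true, if_true,
        if_false, if_pos rfl, ih]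

-- ===== VERDICT (by name: the statement is the Claim_ definition above) =====
theorem calculate_card_points_spec : Claim_equal_calculate_card_points := by
  intro w c _
  show calculate_card_points w c = calculate_card_points_alt w c
  have h := pvLoop (PySem.Set.ofList w) c 0
  rw [show pvPts 0 = 0 by norm_num [pvPts]] at h
  rw [Nat.zero_add] at h
  simp only [calculate_card_points, calculate_card_points_alt, h, pvPts]
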